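-- pv_equiv track=rewrite | github.com/venkatbommidi23/Basic_python_Codes | Reverse_equation.py | reverseEqn
-- ===== SOURCE A (Python) =====
-- def reverseEqn(s):
--     i=0
--     token=[]
--     n=len(s)
--
--     #Traverse entire string
--     while i<n:
--         #To form multidigit number
--         if '0'<=s[i]<='9':
--             nums=""
--
--             #To store continuous number
--             while i<n and '0'<=s[i]<='9':
--                 nums+=s[i]
--                 i+=1
--             #add full number into token
--             token.append(nums)
--         #To store operators
--         else:
--             token.append(s[i])
--             i+=1
--
--     #Reversing the token and converting into string
--     return "".join(token[::-1])
-- ===== SOURCE B (Python) =====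
-- def reverseEqn(s):
--     # Build the result directly back-to-front: scan from the end, emitting each
--     # non-digit character and each maximal digit run (in forward order) as we go.
--     out = []
--     i = len(s) - 1
--     while i >= 0:
--         if s[i].isdigit():
--             j = i
--             while j >= 0 and s[j].isdigit():
--                 j -= 1
--             out.append(s[j + 1:i + 1])
--             i = j
--         else:
--             out.append(s[i])
--             i -= 1
--     return "".join(out)
-- ===== Notes on version B (the rewrite author's own statement) =====
-- stated objective: alternative
-- what changed: B builds the reversed equation directly in one backward scan over the string (emitting each maximal digit run in forward order), instead of A's forward tokenizer that accumulates a token list and then reverses and joins it.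
import Mathlib
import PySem

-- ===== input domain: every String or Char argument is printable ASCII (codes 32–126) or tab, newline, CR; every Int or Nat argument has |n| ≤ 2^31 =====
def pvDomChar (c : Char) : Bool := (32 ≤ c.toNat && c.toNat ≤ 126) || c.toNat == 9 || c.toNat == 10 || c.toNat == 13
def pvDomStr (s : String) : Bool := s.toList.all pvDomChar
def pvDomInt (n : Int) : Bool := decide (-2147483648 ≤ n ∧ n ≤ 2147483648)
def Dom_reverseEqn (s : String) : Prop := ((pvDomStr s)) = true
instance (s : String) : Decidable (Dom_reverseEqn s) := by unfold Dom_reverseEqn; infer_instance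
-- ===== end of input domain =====

-- B builds the reversed equation in one backward scan instead of A's tokenize-then-reverse-and-join.

-- ===== PORT A =====
-- '0' <= c <= '9'
def pvDig (c : Char) : Bool := ('0' ≤ c && c ≤ '9')

-- the inner while: collect the leading digit run into `nums`, return (nums, rest of string)
def pvTakeNums : List Char → List Char × List Char
  | [] => ([], [])
  | c :: r =>
    if pvDig c then
      (c :: (pvTakeNums r).1, (pvTakeNums r).2)
    else ([], c :: r)

theorem pvTakeNums_snd_len : ∀ (l : List Char), (pvTakeNums l).2.length ≤ l.length
  | [] => by simp [pvTakeNums]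
  | c :: r => by
    simp only [pvTakeNums]
    split
    · exact Nat.le_succ_of_le (pvTakeNums_snd_len r)
    · simp

-- the outer while: build the token list
def pvALoop : List Char → List (List Char)
  | [] => []
  | c :: r =>
    if pvDig c then
      (pvTakeNums (c :: r)).1 :: pvALoop (pvTakeNums (c :: r)).2
    else [c] :: pvALoop r
termination_by l => l.length
decreasing_by
  · simp only [pvTakeNums, *, if_pos]
    exact Nat.lt_succ_of_le (pvTakeNums_snd_len r)
  · simp

-- "".join(token[::-1])  (token[::-1] is list reversal)
def reverseEqn (s : String) : String :=
  String.ofList ((pvALoop s.toList).reverse.flatten)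

-- ===== PORT B =====
-- B's backward scan, expressed as a forward recursion over the reversed character
-- list: a digit run seen here is the run of the original in reverse, so B emits it
-- reversed back (= s[j+1:i+1] in forward order), and each non-digit char directly.
def pvBLoop : List Char → List Char
  | [] => []
  | c :: r =>
    if c.isDigit then
      ((c :: r).takeWhile Char.isDigit).reverse ++ pvBLoop ((c :: r).dropWhile Char.isDigit)
    else c :: pvBLoop r
termination_by l => l.length
decreasing_by
  · simp only [List.dropWhile_cons, *, if_pos]
    exact Nat.lt_succ_of_le (List.Sublist.length_le (List.dropWhile_sublist _))
  · simp

def reverseEqn_alt (s : String) : String :=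
  String.ofList (pvBLoop s.toList.reverse)

-- ===== PRECONDITION & SPEC =====
def Spec_reverseEqn (s : String) (out : String) : Prop := out = reverseEqn_alt s
instance (s : String) (out : String) : Decidable (Spec_reverseEqn s out) := by unfold Spec_reverseEqn; infer_instance

-- ===== CLAIM (what is proved, stated in full; the proofs are below) =====
def Claim_equal_reverseEqn : Prop := ∀ (s : String), Dom_reverseEqn s → Spec_reverseEqn s (reverseEqn s)

-- ===== LEMMAS AND PROOFS =====

theorem pvDig_eq_isDigit (c : Char) : pvDig c = c.isDigit := rfl

theorem pvTakeNums_eq (l : List Char) :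
    pvTakeNums l = (l.takeWhile Char.isDigit, l.dropWhile Char.isDigit) := by
  induction l with
  | nil => simp [pvTakeNums]
  | cons c r ih =>
    simp only [pvTakeNums, pvDig_eq_isDigit, List.takeWhile_cons, List.dropWhile_cons]
    split <;> simp_all

-- unfolding pvALoop through pvTakeNums_eq
theorem pvALoop_cons_dig (c : Char) (r : List Char) (h : c.isDigit) :
    pvALoop (c :: r) = ((c :: r).takeWhile Char.isDigit) :: pvALoop ((c :: r).dropWhile Char.isDigit) := by
  rw [pvALoop]
  simp [pvDig_eq_isDigit, h, pvTakeNums_eq]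

theorem pvALoop_cons_nondig (c : Char) (r : List Char) (h : ¬ c.isDigit) :
    pvALoop (c :: r) = [c] :: pvALoop r := by
  rw [pvALoop]
  simp [pvDig_eq_isDigit, h]

theorem head_dropWhile_false {p : Char → Bool} : ∀ (l : List Char) {x xs}, List.dropWhile p l = x :: xs → p x = false := by
  intro l
  induction l with
  | nil => intro x xs h; simp [List.dropWhile] at h
  | cons a as ih =>
    intro x xs h
    rw [List.dropWhile_cons] at h
    by_cases ha : p a
    · rw [if_pos ha] at h; exact ih h
    · rw [if_neg ha] at h
      cases h; simpa using ha

-- dropWhile of a list whose last element fails p is nonempty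
theorem dropWhile_ne_nil_of_last {p : Char → Bool} {xs : List Char}
    (h : ∀ y, xs.getLast? = some y → p y = false) (hne : xs ≠ []) :
    xs.dropWhile p ≠ [] := by
  intro hnil
  have hall := List.dropWhile_eq_nil_iff.mp hnil
  obtain ⟨y, hy⟩ := List.getLast?_isSome.mpr hne |> Option.isSome_iff_exists.mp
  have := hall y (List.mem_of_getLast? hy)
  simp [h y hy] at this

-- appending a single non-digit char adds one token at the end
theorem pvALoop_append_nondig : ∀ (xs : List Char) (c : Char), ¬ c.isDigit →
    pvALoop (xs ++ [c]) = pvALoop xs ++ [[c]]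
  | [], c, h => by simp [pvALoop_cons_nondig c [] h, pvALoop]
  | x :: xs, c, h => by
    by_cases hx : x.isDigit
    · have hdw : ((x :: xs).dropWhile Char.isDigit).length ≤ xs.length := by
        simp only [List.dropWhile_cons, hx, if_pos]
        exact List.Sublist.length_le (List.dropWhile_sublist _)
      have htw : (x :: (xs ++ [c])).takeWhile Char.isDigit
          = (x :: xs).takeWhile Char.isDigit := by
        rw [show x :: (xs ++ [c]) = (x :: xs) ++ [c] by simp, List.takeWhile_append]
        split
        · next hlen =>
          have heq : (x :: xs).takeWhile Char.isDigit = x :: xs :=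
            (List.takeWhile_prefix _).eq_of_length hlen
          simp [heq, h]
        · rfl
      have hdweq : (x :: (xs ++ [c])).dropWhile Char.isDigit
          = (x :: xs).dropWhile Char.isDigit ++ [c] := by
        rw [show x :: (xs ++ [c]) = (x :: xs) ++ [c] by simp, List.dropWhile_append]
        split
        · next hemp =>
          rw [List.isEmpty_iff.mp hemp]
          simp [h]
        · rfl
      rw [show x :: xs ++ [c] = x :: (xs ++ [c]) by simp] at *
      rw [pvALoop_cons_dig x (xs ++ [c]) hx, pvALoop_cons_dig x xs hx, htw, hdweq,
        pvALoop_append_nondig ((x :: xs).dropWhile Char.isDigit) c h]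
      simp
    · rw [show x :: xs ++ [c] = x :: (xs ++ [c]) by simp,
        pvALoop_cons_nondig x (xs ++ [c]) hx, pvALoop_cons_nondig x xs hx,
        pvALoop_append_nondig xs c h]
      simp
termination_by xs => xs.length
decreasing_by
  · exact Nat.lt_succ_of_le hdw
  · simp

-- appending a nonempty all-digit block after a non-digit boundary adds one token
theorem pvALoop_append_digrun : ∀ (xs d : List Char), d ≠ [] → (∀ c ∈ d, c.isDigit) →
    (∀ y, xs.getLast? = some y → ¬ y.isDigit) →
    pvALoop (xs ++ d) = pvALoop xs ++ [d]
  | [], d, hne, hdig, _ => by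
    obtain ⟨c, r, rfl⟩ := List.exists_cons_of_ne_nil hne
    rw [List.nil_append, pvALoop_cons_dig c r (hdig c (by simp))]
    have htw : (c :: r).takeWhile Char.isDigit = c :: r :=
      List.takeWhile_eq_self_iff.mpr hdig
    have hdw : (c :: r).dropWhile Char.isDigit = [] :=
      List.dropWhile_eq_nil_iff.mpr hdig
    rw [htw, hdw]
    simp [pvALoop]
  | x :: xs, d, hne, hdig, hlast => by
    by_cases hx : x.isDigit
    · have hxs : xs ≠ [] := by
        rintro rfl
        exact hlast x (by simp) hx
      have hdnn : (x :: xs).dropWhile Char.isDigit ≠ [] :=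
        dropWhile_ne_nil_of_last (fun y hy => by simpa using hlast y hy) (by simp)
      have hlen : ((x :: xs).takeWhile Char.isDigit).length ≠ (x :: xs).length := by
        intro hl
        have heq : (x :: xs).takeWhile Char.isDigit = x :: xs :=
          (List.takeWhile_prefix _).eq_of_length hl
        have : (x :: xs).dropWhile Char.isDigit = [] :=
          List.dropWhile_eq_nil_iff.mpr (List.takeWhile_eq_self_iff.mp heq)
        exact hdnn this
      have htw : ((x :: xs) ++ d).takeWhile Char.isDigit = (x :: xs).takeWhile Char.isDigit := by
        rw [List.takeWhile_append, if_neg hlen]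
      have hdweq : ((x :: xs) ++ d).dropWhile Char.isDigit
          = (x :: xs).dropWhile Char.isDigit ++ d := by
        rw [List.dropWhile_append, if_neg (by simpa [List.isEmpty_iff] using hdnn)]
      have hsz : ((x :: xs).dropWhile Char.isDigit).length ≤ xs.length := by
        simp only [List.dropWhile_cons, hx, if_pos]
        exact List.Sublist.length_le (List.dropWhile_sublist _)
      have hlast' : ∀ y, ((x :: xs).dropWhile Char.isDigit).getLast? = some y → ¬ y.isDigit := by
        intro y hy
        have hsuf : (x :: xs).dropWhile Char.isDigit <:+ (x :: xs) := List.dropWhile_suffix _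
        obtain ⟨pre, hpre⟩ := hsuf
        have : (x :: xs).getLast? = some y := by
          rw [← hpre, List.getLast?_append, hy]; rfl
        exact hlast y this
      rw [show (x :: xs) ++ d = x :: (xs ++ d) by simp] at *
      rw [pvALoop_cons_dig x (xs ++ d) hx, pvALoop_cons_dig x xs hx]
      rw [show x :: (xs ++ d) = (x :: xs) ++ d by simp] at *
      rw [htw, hdweq, pvALoop_append_digrun ((x :: xs).dropWhile Char.isDigit) d hne hdig hlast']
      simp
    · have hlast' : ∀ y, xs.getLast? = some y → ¬ y.isDigit := by
        intro y hy
        apply hlast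
        cases xs with
        | nil => simp at hy
        | cons a as => simpa [List.getLast?_cons_cons] using hy
      rw [show (x :: xs) ++ d = x :: (xs ++ d) by simp,
        pvALoop_cons_nondig x (xs ++ d) hx, pvALoop_cons_nondig x xs hx,
        pvALoop_append_digrun xs d hne hdig hlast']
      simp
termination_by xs => xs.length
decreasing_by
  · exact Nat.lt_succ_of_le hsz
  · simp

theorem pv_main : ∀ (m : List Char),
    pvBLoop m = ((pvALoop m.reverse).reverse).flatten
  | [] => by simp [pvBLoop, pvALoop]
  | c :: r => by
    by_cases hc : c.isDigit
    · have hrun : (c :: r).takeWhile Char.isDigit ≠ [] := by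
        simp [hc]
      have hsplit : (c :: r).takeWhile Char.isDigit ++ (c :: r).dropWhile Char.isDigit = c :: r :=
        List.takeWhile_append_dropWhile
      have hrevsplit : (c :: r).reverse
          = ((c :: r).dropWhile Char.isDigit).reverse ++ ((c :: r).takeWhile Char.isDigit).reverse := by
        rw [← List.reverse_append, hsplit]
      have hdig : ∀ x ∈ ((c :: r).takeWhile Char.isDigit).reverse, x.isDigit := by
        intro x hx
        exact List.mem_takeWhile_imp (List.mem_reverse.mp hx)
      have hlast : ∀ y, (((c :: r).dropWhile Char.isDigit).reverse).getLast? = some y → ¬ y.isDigit := by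
        intro y hy
        rw [List.getLast?_reverse] at hy
        cases hdw : (c :: r).dropWhile Char.isDigit with
        | nil => rw [hdw] at hy; simp at hy
        | cons a as =>
          rw [hdw] at hy
          simp only [List.head?_cons, Option.some.injEq] at hy
          subst hy
          simp [head_dropWhile_false _ hdw]
      have hsz : ((c :: r).dropWhile Char.isDigit).length ≤ r.length := by
        simp only [List.dropWhile_cons, hc, if_pos]
        exact List.Sublist.length_le (List.dropWhile_sublist _)
      rw [pvBLoop, if_pos hc, hrevsplit,
        pvALoop_append_digrun _ _ (by simpa using hrun) hdig hlast,
        pv_main ((c :: r).dropWhile Char.isDigit)]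
      simp
    · rw [pvBLoop, if_neg hc,
        show (c :: r).reverse = r.reverse ++ [c] by simp,
        pvALoop_append_nondig r.reverse c hc, pv_main r]
      simp
termination_by m => m.length
decreasing_by
  · exact Nat.lt_succ_of_le hsz
  · simp

-- ===== VERDICT (by name: the statement is the Claim_ definition above) =====
theorem reverseEqn_spec : Claim_equal_reverseEqn := by
  intro s _
  unfold Spec_reverseEqn reverseEqn reverseEqn_alt
  rw [pv_main, List.reverse_reverse]
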